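-- pv_equiv track=rewrite | github.com/Kacper-Pietkun/Speech-to-face | src/datasets/face_decoder_dataset_split.py | get_age_group
-- ===== SOURCE A (Python) =====
-- def get_age_group(age):
--     age_groups = {
--         # Group Name and and the age from which one is included in that group
--         "Child": 0,
--         "YoungAdult": 18,
--         "MiddleAgedAdult": 30,
--         "OldAgedAdults": 45
--     }
--     selected_key = ""
--     for key, value in age_groups.items():
--         if age < value:
--             break
--         selected_key = key
--     assert selected_key != ""
--     return selected_key
-- ===== SOURCE B (Python) =====
-- def get_age_group(age):
--     assert age >= 0
--     if age < 18:
--         return "Child"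
--     if age < 30:
--         return "YoungAdult"
--     if age < 45:
--         return "MiddleAgedAdult"
--     return "OldAgedAdults"
-- ===== Notes on version B (the rewrite author's own statement) =====
-- stated objective: simpler
-- what changed: Replaced the dict table, iteration with break, and string-sentinel accumulator by a plain comparison cascade on the upper boundaries, with an explicit assert age >= 0 keeping A's AssertionError on negative ages.
import Mathlib
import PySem

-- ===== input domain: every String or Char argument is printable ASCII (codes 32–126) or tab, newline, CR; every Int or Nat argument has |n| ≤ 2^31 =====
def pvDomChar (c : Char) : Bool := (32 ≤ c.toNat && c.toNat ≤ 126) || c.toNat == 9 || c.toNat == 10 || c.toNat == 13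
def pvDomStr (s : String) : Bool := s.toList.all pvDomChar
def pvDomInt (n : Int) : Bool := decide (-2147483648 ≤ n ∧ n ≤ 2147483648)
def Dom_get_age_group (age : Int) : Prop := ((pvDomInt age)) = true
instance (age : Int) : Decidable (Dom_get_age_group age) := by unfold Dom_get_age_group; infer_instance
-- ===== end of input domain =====

-- B replaces A's dict table + break-loop + sentinel/assert by a plain comparison cascade (simpler); both raise AssertionError on age < 0, excluded by Pre_.


-- ===== PORT A =====
-- the loop over age_groups.items() with break; acc is selected_key
def pvLoopA (age : Int) : List (String × Int) → String → String
  | [], acc => acc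
  | (k, v) :: rest, acc => if age < v then acc else pvLoopA age rest k

def get_age_group (age : Int) : String :=
  let age_groups : List (String × Int) :=
    [("Child", 0), ("YoungAdult", 18), ("MiddleAgedAdult", 30), ("OldAgedAdults", 45)]
  pvLoopA age age_groups ""
  -- the assert: selected_key = "" exactly when age < 0; excluded by Pre_get_age_group

-- ===== PORT B =====
-- B's 'assert age >= 0' raises exactly where A's assert does; those inputs are outside Pre_.
def get_age_group_alt (age : Int) : String :=
  if age < 18 then "Child"
  else if age < 30 then "YoungAdult"
  else if age < 45 then "MiddleAgedAdult"
  else "OldAgedAdults"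

-- ===== PRECONDITION & SPEC =====
-- Pre_ excludes age < 0, where both A's and B's assert raise AssertionError
def Pre_get_age_group (age : Int) : Prop := 0 ≤ age
instance (age : Int) : Decidable (Pre_get_age_group age) := by unfold Pre_get_age_group; infer_instance
def pvWitness_get_age_group : Int := 25

def Spec_get_age_group (age : Int) (out : String) : Prop := out = get_age_group_alt age
instance (age : Int) (out : String) : Decidable (Spec_get_age_group age out) := by unfold Spec_get_age_group; infer_instance

-- ===== CLAIM =====
def Claim_equal_get_age_group : Prop := ∀ (age : Int), Dom_get_age_group age → Pre_get_age_group age → Spec_get_age_group age (get_age_group age)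

-- ===== LEMMAS AND PROOFS =====

-- ===== VERDICT =====
theorem get_age_group_spec : Claim_equal_get_age_group := by
  intro age _ hpre
  unfold Spec_get_age_group get_age_group get_age_group_alt
  simp only [pvLoopA]
  unfold Pre_get_age_group at hpre
  split_ifs <;> first | rfl | omega
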